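-- pv_equiv track=rewrite | github.com/francis-lan/bladder_medi_ai | define_work.py | pre_wrong_count
-- ===== SOURCE A (Python) =====
-- def pre_wrong_count(movement):
--     pwc = []
--     for i in range(len(movement)-1, 0, -1):
--         if movement[i] > 0:
--             pwc.append(abs(movement[i]))
--         elif movement[i] < 0:
--             return pwc
--     return pwc
-- ===== SOURCE B (Python) =====
-- def pre_wrong_count(movement):
--     result = []
--     for x in movement[1:]:
--         if x < 0:
--             result = []
--         elif x > 0:
--             result.append(abs(x))
--     return result[::-1]
-- ===== Notes on version B (the rewrite author's own statement) =====
-- stated objective: alternative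
-- what changed: Forward single pass over the tail that resets the accumulator at every negative (so it ends holding the positives after the last negative) followed by one reversal, instead of A's index-based backward scan with early return.
import Mathlib
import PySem

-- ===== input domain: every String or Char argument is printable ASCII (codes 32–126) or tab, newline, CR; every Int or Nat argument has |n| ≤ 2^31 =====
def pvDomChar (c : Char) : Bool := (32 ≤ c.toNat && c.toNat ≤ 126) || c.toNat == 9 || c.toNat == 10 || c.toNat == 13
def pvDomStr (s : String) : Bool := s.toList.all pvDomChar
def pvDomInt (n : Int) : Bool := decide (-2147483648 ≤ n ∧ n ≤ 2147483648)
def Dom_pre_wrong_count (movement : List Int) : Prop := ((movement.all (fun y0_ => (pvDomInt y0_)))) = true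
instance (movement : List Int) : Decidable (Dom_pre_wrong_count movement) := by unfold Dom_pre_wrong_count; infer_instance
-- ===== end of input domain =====

-- B replaces A's backward index scan with early return by a forward pass that resets its accumulator at each negative, then one reversal (alternative decomposition).


-- ===== PORT A =====
-- the for-loop over range(len-1, 0, -1) with early return on a negative element
-- (indices produced by the range are always in bounds, so pyGetD's default 0 is never used)
def preLoopA (movement : List Int) (pwc : List Int) : List Int → List Int
  | [] => pwc
  | i :: rest =>
    if PySem.List.pyGetD movement i 0 > 0 then
      preLoopA movement (pwc ++ [|PySem.List.pyGetD movement i 0|]) rest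
    else if PySem.List.pyGetD movement i 0 < 0 then pwc
    else preLoopA movement pwc rest

def pre_wrong_count (movement : List Int) : List Int :=
  preLoopA movement [] (PySem.List.pyRange ((movement.length : Int) - 1) 0 (-1))

-- ===== PORT B =====
-- forward loop over movement[1:], resetting `result` on a negative; result[::-1] at the end
def pre_wrong_count_alt (movement : List Int) : List Int :=
  let result := (PySem.List.slice movement (some 1) none).foldl
    (fun res x => if x < 0 then [] else if x > 0 then res ++ [|x|] else res) []
  result.reverse

-- ===== PRECONDITION & SPEC =====
def Spec_pre_wrong_count (movement : List Int) (out : List Int) : Prop := out = pre_wrong_count_alt movement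
instance (movement : List Int) (out : List Int) : Decidable (Spec_pre_wrong_count movement out) := by unfold Spec_pre_wrong_count; infer_instance

-- ===== CLAIM (what is proved, stated in full; the proofs are below) =====
def Claim_equal_pre_wrong_count : Prop := ∀ (movement : List Int), Dom_pre_wrong_count movement → Spec_pre_wrong_count movement (pre_wrong_count movement)

-- ===== LEMMAS AND PROOFS =====

-- the value-level recursion A's loop performs, on the list of fetched values
def gSpec : List Int → List Int
  | [] => []
  | x :: xs => if x > 0 then |x| :: gSpec xs else if x < 0 then [] else gSpec xs

theorem preLoopA_eq_gSpec (movement : List Int) (idxs pwc : List Int) :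
    preLoopA movement pwc idxs = pwc ++ gSpec (idxs.map (fun i => PySem.List.pyGetD movement i 0)) := by
  induction idxs generalizing pwc with
  | nil => simp [preLoopA, gSpec]
  | cons i rest ih =>
    simp only [preLoopA, List.map_cons, gSpec]
    split_ifs with h1 h2
    · rw [ih]; simp
    · simp
    · exact ih pwc

theorem idx_map_eq (movement : List Int) :
    (PySem.List.pyRange ((movement.length : Int) - 1) 0 (-1)).map (fun i => PySem.List.pyGetD movement i 0)
      = (movement.drop 1).reverse := by
  have h : PySem.List.pyRange ((movement.length : Int) - 1) 0 (-1)
      = (PySem.List.pyRange 1 (movement.length : Int) 1).reverse := by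
    rw [PySem.List.pyRange_neg_one_eq_reverse]
    norm_num
  rw [h, List.map_reverse]
  congr 1
  have := PySem.List.map_pyGetD_pyRange' (xs := movement) (d := (0 : Int)) (a := 1) (by norm_num)
  simpa using this

-- B's forward fold, reversed, computes gSpec of the reversed list
theorem foldB_reverse_eq_gSpec (t : List Int) :
    (t.foldl (fun res x => if x < 0 then [] else if x > 0 then res ++ [|x|] else res) []).reverse
      = gSpec t.reverse := by
  induction t using List.reverseRecOn with
  | nil => simp [gSpec]
  | append_singleton t x ih =>
    simp only [List.foldl_append, List.foldl_cons, List.foldl_nil, List.reverse_append,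
      List.reverse_singleton, List.singleton_append]
    rcases lt_trichotomy x 0 with h | h | h
    · simp [gSpec, h, h.not_gt]
    · subst h; simpa [gSpec] using ih
    · rw [if_neg (not_lt.mpr h.le), if_pos h, List.reverse_append, ih]
      simp [gSpec, h]

-- ===== VERDICT (by name: the statement is the Claim_ definition above) =====
theorem pre_wrong_count_spec : Claim_equal_pre_wrong_count := by
  intro movement _
  unfold Spec_pre_wrong_count pre_wrong_count pre_wrong_count_alt
  rw [preLoopA_eq_gSpec, idx_map_eq, PySem.List.slice_from_one, foldB_reverse_eq_gSpec]
  simp [← List.drop_one]
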